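-- pv_equiv track=rewrite | github.com/valory-xyz/mech-predict | benchmark/scorer.py | _partition_rows_by_platform
-- ===== SOURCE A (Python) =====
-- from typing import Any
--
-- PLATFORMS: tuple[str, ...] = ("omen", "polymarket")
--
-- def _partition_rows_by_platform(
--     rows: list[dict[str, Any]],
-- ) -> dict[str, list[dict[str, Any]]]:
--     """Group rows by ``row['platform']`` for the platforms we report on.
--
--     Rows with unknown/missing platforms stay in the combined output but are
--     excluded from per-platform partitions — the daily report only needs
--     omen and polymarket.
--
--     :param rows: input rows (any platform).
--     :return: ``{platform: [rows]}`` with one entry per ``PLATFORMS`` value.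
--         Empty lists are returned for platforms with no rows (so callers can
--         still emit an empty-but-valid output file).
--     """
--     buckets: dict[str, list[dict[str, Any]]] = {plat: [] for plat in PLATFORMS}
--     for row in rows:
--         plat = row.get("platform")
--         if plat in buckets:
--             buckets[plat].append(row)
--     return buckets
-- ===== SOURCE B (Python) =====
-- from typing import Any
--
-- PLATFORMS: tuple[str, ...] = ("omen", "polymarket")
--
-- def _partition_rows_by_platform(
--     rows: list[dict[str, Any]],
-- ) -> dict[str, list[dict[str, Any]]]:
--     """Group rows by platform: one filtering scan per reported platform."""
--     return {
--         plat: [row for row in rows if row.get("platform") == plat]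
--         for plat in PLATFORMS
--     }
-- ===== Notes on version B (the rewrite author's own statement) =====
-- stated objective: alternative
-- what changed: Replaces the single routing pass over rows updating a pre-seeded mutable bucket dict with a dict comprehension over the fixed PLATFORMS tuple, each platform independently filtering the rows list.
import Mathlib
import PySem

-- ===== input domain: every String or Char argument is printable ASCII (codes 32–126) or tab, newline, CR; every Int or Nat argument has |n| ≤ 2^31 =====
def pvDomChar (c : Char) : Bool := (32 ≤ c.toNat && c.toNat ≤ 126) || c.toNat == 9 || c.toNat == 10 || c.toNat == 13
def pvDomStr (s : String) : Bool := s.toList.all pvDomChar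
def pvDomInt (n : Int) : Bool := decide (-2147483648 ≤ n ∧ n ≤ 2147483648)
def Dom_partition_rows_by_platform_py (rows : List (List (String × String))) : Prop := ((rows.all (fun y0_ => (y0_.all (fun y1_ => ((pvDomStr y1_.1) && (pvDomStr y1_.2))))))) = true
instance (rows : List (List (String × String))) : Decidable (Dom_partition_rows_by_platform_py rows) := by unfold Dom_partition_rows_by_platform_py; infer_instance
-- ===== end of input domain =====

-- B replaces A's single routing pass over rows (mutable pre-seeded buckets) by one
-- independent filtering scan of rows per platform; alternative decomposition, same cost.
-- ===== PORT A =====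
def pvPlatforms : List String := ["omen", "polymarket"]

def pvStepA (b : PySem.Dict String (List (List (String × String)))) (row : List (String × String)) :
    PySem.Dict String (List (List (String × String))) :=
  match (PySem.Dict.mk row).get? "platform" with
  | some plat => if b.contains plat then b.modify plat [] (· ++ [row]) else b
  | none => b

def partition_rows_by_platform_py (rows : List (List (String × String))) : List (String × List (List (String × String))) :=
  let buckets := pvPlatforms.foldl (fun b p => b.insert p ([] : List (List (String × String)))) PySem.Dict.empty
  (rows.foldl pvStepA buckets).items

-- ===== PORT B =====
def partition_rows_by_platform_py_alt (rows : List (List (String × String))) : List (String × List (List (String × String))) :=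
  pvPlatforms.map (fun plat => (plat, rows.filter (fun row => (PySem.Dict.mk row).get? "platform" == some plat)))

-- ===== PRECONDITION & SPEC =====
def Spec_partition_rows_by_platform_py (rows : List (List (String × String))) (out : List (String × List (List (String × String)))) : Prop := out = partition_rows_by_platform_py_alt rows
instance (rows : List (List (String × String))) (out : List (String × List (List (String × String)))) : Decidable (Spec_partition_rows_by_platform_py rows out) := by unfold Spec_partition_rows_by_platform_py; infer_instance

-- ===== CLAIM (what is proved, stated in full; the proofs are below) =====
def Claim_equal_partition_rows_by_platform_py : Prop := ∀ (rows : List (List (String × String))), Dom_partition_rows_by_platform_py rows → Spec_partition_rows_by_platform_py rows (partition_rows_by_platform_py rows)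

-- ===== LEMMAS AND PROOFS =====
theorem pvLoop (rows : List (List (String × String)))
    (xs ys : List (List (String × String))) :
    rows.foldl pvStepA (PySem.Dict.mk [("omen", xs), ("polymarket", ys)]) =
      PySem.Dict.mk
        [("omen", xs ++ rows.filter (fun row => (PySem.Dict.mk row).get? "platform" == some "omen")),
         ("polymarket", ys ++ rows.filter (fun row => (PySem.Dict.mk row).get? "platform" == some "polymarket"))] := by
  induction rows generalizing xs ys with
  | nil => simp
  | cons r rs ih =>
    simp only [List.foldl_cons, List.filter_cons]
    rcases h : (PySem.Dict.mk r).get? "platform" with _ | p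
    · simp only [pvStepA, h]
      simp [ih]
    · simp only [pvStepA, h]
      by_cases ho : p = "omen"
      · subst ho
        rw [show ((if (PySem.Dict.mk [("omen", xs), ("polymarket", ys)]).contains "omen" then
              (PySem.Dict.mk [("omen", xs), ("polymarket", ys)]).modify "omen" [] (· ++ [r])
            else PySem.Dict.mk [("omen", xs), ("polymarket", ys)]) =
            PySem.Dict.mk [("omen", xs ++ [r]), ("polymarket", ys)]) by
          simp [PySem.Dict.modify, PySem.Dict.contains, PySem.Dict.insert, PySem.Dict.get?, PySem.Dict.getD]]
        simp [ih]
      · by_cases hp : p = "polymarket"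
        · subst hp
          rw [show ((if (PySem.Dict.mk [("omen", xs), ("polymarket", ys)]).contains "polymarket" then
                (PySem.Dict.mk [("omen", xs), ("polymarket", ys)]).modify "polymarket" [] (· ++ [r])
              else PySem.Dict.mk [("omen", xs), ("polymarket", ys)]) =
              PySem.Dict.mk [("omen", xs), ("polymarket", ys ++ [r])]) by
            simp [PySem.Dict.modify, PySem.Dict.contains, PySem.Dict.insert, PySem.Dict.get?, PySem.Dict.getD]]
          simp [ih]
        · rw [show ((if (PySem.Dict.mk [("omen", xs), ("polymarket", ys)]).contains p then
                (PySem.Dict.mk [("omen", xs), ("polymarket", ys)]).modify p [] (· ++ [r])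
              else PySem.Dict.mk [("omen", xs), ("polymarket", ys)]) =
              PySem.Dict.mk [("omen", xs), ("polymarket", ys)]) by
            have : (PySem.Dict.mk [("omen", xs), ("polymarket", ys)] : PySem.Dict String (List (List (String × String)))).contains p = false := by
              simp [PySem.Dict.contains]
              exact ⟨fun hc => (ho hc.symm).elim, fun hc => (hp hc.symm).elim⟩
            rw [this]; simp]
          simp [ho, hp, ih]

-- ===== VERDICT (by name: the statement is the Claim_ definition above) =====
theorem partition_rows_by_platform_py_spec : Claim_equal_partition_rows_by_platform_py := by
  intro rows _
  show partition_rows_by_platform_py rows = partition_rows_by_platform_py_alt rows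
  show (rows.foldl pvStepA (PySem.Dict.mk [("omen", []), ("polymarket", [])])).items =
    partition_rows_by_platform_py_alt rows
  rw [pvLoop]
  rfl
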